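-- pv_equiv track=rewrite | github.com/NadavK/ShabbatMusic | jewish_dates/sun.py | SubtractMinutes
-- ===== SOURCE A (Python) =====
-- def SubtractMinutes(time, min):
--   if (time == None):
--     return None
--   time2 = time
--   time2[1] -= min
--   while (time2[1] < 0):
--     time2[1] += 60
--     time2[0] -= 1
--   return time2
-- ===== SOURCE B (Python) =====
-- def SubtractMinutes(time, min):
--   # closed-form borrow via floor division (mutates `time` in place, like A)
--   if time is None:
--     return None
--   d = time[1] - min
--   if d < 0:
--     time[0] += d // 60
--     d %= 60
--   time[1] = d
--   return time
-- ===== Notes on version B (the rewrite author's own statement) =====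
-- stated objective: simpler
-- what changed: Replaced the borrow-by-60 while loop with a closed-form floor-division/modulo computation of the hour borrow.
import Mathlib
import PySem

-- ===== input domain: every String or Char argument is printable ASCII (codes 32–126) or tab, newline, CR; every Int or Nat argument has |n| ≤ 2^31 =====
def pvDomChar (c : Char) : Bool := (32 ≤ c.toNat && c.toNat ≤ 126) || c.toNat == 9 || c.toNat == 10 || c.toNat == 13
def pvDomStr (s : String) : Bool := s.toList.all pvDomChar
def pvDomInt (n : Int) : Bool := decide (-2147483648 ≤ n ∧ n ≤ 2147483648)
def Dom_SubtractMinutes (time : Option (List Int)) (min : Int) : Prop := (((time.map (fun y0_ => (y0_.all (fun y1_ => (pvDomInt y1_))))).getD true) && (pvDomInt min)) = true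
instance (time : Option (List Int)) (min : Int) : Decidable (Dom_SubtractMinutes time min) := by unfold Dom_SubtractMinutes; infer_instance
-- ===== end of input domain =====

-- B replaces A's borrow-by-60 while loop with one closed-form floordiv/mod borrow computation (simpler, loop-free).
-- Both Pythons mutate the `time` list in place; the equivalence proved here is about the return value.

-- ===== PORT A =====
-- the `while time2[1] < 0` loop: each pass does time2[1] += 60; time2[0] -= 1
def pvALoop (t : List Int) : List Int :=
  match t with
  | h :: m :: rest =>
    if hm : m < 0 then pvALoop ((h - 1) :: (m + 60) :: rest) else t
  | _ => t
termination_by (match t with | _ :: m :: _ => (-m).toNat | _ => 0)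
decreasing_by simp_wf; omega

def SubtractMinutes (time : Option (List Int)) (min : Int) : Option (List Int) :=
  match time with
  | none => none                               -- if time == None: return None
  | some t =>
    match t with
    | h :: m :: rest => some (pvALoop (h :: (m - min) :: rest))   -- time2[1] -= min; while loop
    | _ => none                                -- time[1] raises IndexError; excluded by Pre_

-- ===== PORT B =====
def SubtractMinutes_alt (time : Option (List Int)) (min : Int) : Option (List Int) :=
  match time with
  | none => none
  | some t =>
    match t with
    | h :: m :: rest =>
      let d := m - min
      if d < 0 then some ((h + PySem.Int.floordiv d 60) :: PySem.Int.mod d 60 :: rest)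
      else some (h :: d :: rest)
    | _ => none                                -- time[1] raises IndexError; excluded by Pre_

-- ===== PRECONDITION & SPEC =====
-- Pre_ excludes only inputs where A raises IndexError: a non-None list with fewer than 2 elements.
def Pre_SubtractMinutes (time : Option (List Int)) (min : Int) : Prop :=
  (time.map (fun t => decide (2 ≤ t.length))).getD true = true
instance (time : Option (List Int)) (min : Int) : Decidable (Pre_SubtractMinutes time min) := by
  unfold Pre_SubtractMinutes; infer_instance
def pvWitness_SubtractMinutes : Option (List Int) × Int := (some [3, 10], 25)

def Spec_SubtractMinutes (time : Option (List Int)) (min : Int) (out : Option (List Int)) : Prop := out = SubtractMinutes_alt time min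
instance (time : Option (List Int)) (min : Int) (out : Option (List Int)) : Decidable (Spec_SubtractMinutes time min out) := by unfold Spec_SubtractMinutes; infer_instance

-- ===== CLAIM (what is proved, stated in full; the proofs are below) =====
def Claim_equal_SubtractMinutes : Prop := ∀ (time : Option (List Int)) (min : Int), Dom_SubtractMinutes time min → Pre_SubtractMinutes time min → Spec_SubtractMinutes time min (SubtractMinutes time min)

-- ===== LEMMAS AND PROOFS =====
lemma pvALoop_closed (h m : Int) (rest : List Int) :
    pvALoop (h :: m :: rest) =
      if m < 0 then (h + PySem.Int.floordiv m 60) :: PySem.Int.mod m 60 :: rest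
      else h :: m :: rest := by
  induction hn : (-m).toNat using Nat.strong_induction_on generalizing h m with
  | _ n ih =>
    rw [pvALoop.eq_def]; dsimp only
    by_cases hm : m < 0
    · rw [dif_pos hm, ih (-(m + 60)).toNat (by omega) (h - 1) (m + 60) rfl]
      have h60 : (0:Int) < 60 := by norm_num
      by_cases hm2 : m + 60 < 0
      · rw [if_pos hm2, PySem.Int.floordiv_eq_ediv_of_pos h60, PySem.Int.mod_eq_emod_of_pos h60,
            if_pos hm, PySem.Int.floordiv_eq_ediv_of_pos h60, PySem.Int.mod_eq_emod_of_pos h60]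
        congr 1
        · omega
        · congr 1; omega
      · rw [if_neg hm2, if_pos hm, PySem.Int.floordiv_eq_ediv_of_pos h60,
            PySem.Int.mod_eq_emod_of_pos h60]
        congr 1
        · omega
        · congr 1; omega
    · rw [dif_neg hm, if_neg hm]

-- ===== VERDICT (by name: the statement is the Claim_ definition above) =====
theorem SubtractMinutes_spec : Claim_equal_SubtractMinutes := by
  intro time min _ hpre
  unfold Spec_SubtractMinutes SubtractMinutes SubtractMinutes_alt
  match time with
  | none => rfl
  | some [] => simp [Pre_SubtractMinutes] at hpre
  | some [x] => simp [Pre_SubtractMinutes] at hpre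
  | some (h :: m :: rest) =>
    simp only []
    rw [pvALoop_closed]
    by_cases hd : m - min < 0 <;> simp [hd]
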